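-- pv_equiv track=rewrite | github.com/hayleyshim/algo_practice | 1.use_of_two_dimension_list/initArray07.py | solution
-- ===== SOURCE A (Python) =====
-- def solution(row, col):
--     result = [[0 for _ in range(col)] for _ in range(row)]
--     num = 1
--
--
--     for c in range(col - 1, -1, -1):
--         if (col%2 == 1 and c%2 ==0) or (col%2==0 and c%2 ==1):
--             for r in range(row-1, -1, -1):
--                 result[r][c] = num
--                 num+=1
--
--         else:
--             for r in range(0, row):
--                 result[r][c] = num
--                 num+=1
--
--     return result
-- ===== SOURCE B (Python) =====
-- def solution(row, col):
--     # Closed form: column c is processed (col-1-c)-th, so its values start at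
--     # (col-1-c)*row; it is filled bottom-to-top iff c's parity differs from col's.
--     return [[(col - 1 - c) * row + (row - r if c % 2 != col % 2 else r + 1)
--              for c in range(col)]
--             for r in range(row)]
-- ===== Notes on version B (the rewrite author's own statement) =====
-- stated objective: simpler
-- what changed: Replaces the mutable grid and running counter traversed column-by-column in snake order with a closed-form per-cell formula ((col-1-c)*row plus a parity-chosen within-column offset) evaluated in a plain nested comprehension.
import Mathlib
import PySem

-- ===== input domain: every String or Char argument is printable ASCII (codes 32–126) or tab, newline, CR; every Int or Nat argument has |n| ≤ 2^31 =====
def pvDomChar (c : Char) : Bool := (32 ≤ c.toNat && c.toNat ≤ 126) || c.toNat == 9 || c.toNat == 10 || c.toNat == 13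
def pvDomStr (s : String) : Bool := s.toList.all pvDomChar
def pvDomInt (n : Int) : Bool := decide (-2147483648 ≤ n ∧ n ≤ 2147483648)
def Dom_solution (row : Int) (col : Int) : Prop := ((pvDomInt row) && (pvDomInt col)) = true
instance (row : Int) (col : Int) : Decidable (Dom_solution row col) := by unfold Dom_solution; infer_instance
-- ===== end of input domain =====

-- B replaces A's column-wise snake traversal with a running counter by a closed-form
-- per-cell formula in a plain nested comprehension (objective: simpler; same O(row*col) cost).

-- ===== PORT A =====
-- A-side helper: the body 'result[r][c] = num; num += 1' shared by both inner loops
-- (indices r, c come from ranges and are nonnegative, so pyGetD/pySetD are exact Python indexing here).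
def pvCell (c : Int) (st : List (List Int) × Int) (r : Int) : List (List Int) × Int :=
  (PySem.List.pySetD st.1 r (PySem.List.pySetD (PySem.List.pyGetD st.1 r []) c st.2), st.2 + 1)

-- A-side helper: one iteration of the outer 'for c in range(col-1, -1, -1)' loop.
def pvColStep (row : Int) (col : Int) (st : List (List Int) × Int) (c : Int) :
    List (List Int) × Int :=
  if (PySem.Int.mod col 2 = 1 ∧ PySem.Int.mod c 2 = 0) ∨
     (PySem.Int.mod col 2 = 0 ∧ PySem.Int.mod c 2 = 1) then
    (PySem.List.pyRange (row - 1) (-1) (-1)).foldl (pvCell c) st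
  else
    (PySem.List.pyRange 0 row 1).foldl (pvCell c) st

def solution (row : Int) (col : Int) : List (List Int) :=
  let result := (PySem.List.pyRange 0 row 1).map
    (fun _ => (PySem.List.pyRange 0 col 1).map (fun _ => (0 : Int)))
  ((PySem.List.pyRange (col - 1) (-1) (-1)).foldl (pvColStep row col) (result, 1)).1

-- ===== PORT B =====
def solution_alt (row : Int) (col : Int) : List (List Int) :=
  (PySem.List.pyRange 0 row 1).map (fun r =>
    (PySem.List.pyRange 0 col 1).map (fun c =>
      (col - 1 - c) * row +
        (if PySem.Int.mod c 2 ≠ PySem.Int.mod col 2 then row - r else r + 1)))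

-- ===== PRECONDITION & SPEC =====
def Spec_solution (row : Int) (col : Int) (out : List (List Int)) : Prop := out = solution_alt row col
instance (row : Int) (col : Int) (out : List (List Int)) : Decidable (Spec_solution row col out) := by unfold Spec_solution; infer_instance

-- ===== CLAIM (what is proved, stated in full; the proofs are below) =====
def Claim_equal_solution : Prop := ∀ (row : Int) (col : Int), Dom_solution row col → Spec_solution row col (solution row col)

-- ===== LEMMAS AND PROOFS =====

-- B's per-cell value.
def pvVal (row col r c : Int) : Int :=
  (col - 1 - c) * row +
    (if PySem.Int.mod c 2 ≠ PySem.Int.mod col 2 then row - r else r + 1)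

-- The grid after A has processed the columns col-1, col-2, …, k (columns < k still zero).
def pvGrid (row col k : Int) : List (List Int) :=
  (PySem.List.pyRange 0 row 1).map (fun r =>
    (PySem.List.pyRange 0 col 1).map (fun c => if c < k then 0 else pvVal row col r c))

-- A's downward inner loop 'for r in range(j, -1, -1)'.
lemma pv_inner_down (c : Int) : ∀ (j : Int), -1 ≤ j → ∀ (g : List (List Int)) (num : Int),
    (PySem.List.pyRange j (-1) (-1)).foldl (pvCell c) (g, num) =
      (g.mapIdx (fun r rw => if (r : Int) ≤ j then PySem.List.pySetD rw c (num + (j - r)) else rw),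
       num + (j + 1)) := by
  intro j hj
  induction hn : (j + 1).toNat generalizing j with
  | zero =>
    intro g num
    have hj' : j = -1 := by omega
    subst hj'
    rw [PySem.List.pyRange_neg_one_eq_nil (by omega)]
    simp only [List.foldl_nil]
    refine Prod.ext ?_ (by omega)
    apply List.ext_getElem
    · simp
    · intro i h1 h2
      simp only [List.getElem_mapIdx]
      rw [if_neg (by omega)]
  | succ n ih =>
    intro g num
    have hj0 : 0 ≤ j := by omega
    rw [PySem.List.pyRange_neg_one_cons (by omega)]
    simp only [List.foldl_cons]
    have hcell : pvCell c (g, num) j =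
        (PySem.List.pySetD g j (PySem.List.pySetD (PySem.List.pyGetD g j []) c num), num + 1) := rfl
    rw [hcell, ih (j - 1) (by omega) (by omega)]
    refine Prod.ext ?_ (by simp; omega)
    simp only
    apply List.ext_getElem
    · simp [PySem.List.pySetD_of_nonneg _ _ hj0]
    · intro i h1 h2
      simp only [List.getElem_mapIdx]
      simp only [PySem.List.pySetD_of_nonneg _ _ hj0, List.getElem_set]
      simp only [List.length_mapIdx, List.length_set,
        PySem.List.pySetD_of_nonneg _ _ hj0] at h1 h2
      by_cases hij : j.toNat = i
      · subst hij
        rw [if_neg (by omega), if_pos rfl, if_pos (by omega)]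
        rw [PySem.List.pyGetD_eq_getElem g [] hj0 (by omega)]
        congr 1
        omega
      · rw [if_neg hij]
        by_cases hle : (i : Int) ≤ j - 1
        · rw [if_pos hle, if_pos (by omega)]
          congr 1
          omega
        · rw [if_neg hle, if_neg (by omega)]

-- A's upward inner loop 'for r in range(a, b)'.
lemma pv_inner_up (c b : Int) : ∀ (a : Int), 0 ≤ a → ∀ (g : List (List Int)) (num : Int),
    (PySem.List.pyRange a b 1).foldl (pvCell c) (g, num) =
      (g.mapIdx (fun r rw =>
          if a ≤ (r : Int) ∧ (r : Int) < b then PySem.List.pySetD rw c (num + (r - a)) else rw),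
       num + max (b - a) 0) := by
  intro a ha
  induction hn : (b - a).toNat generalizing a with
  | zero =>
    intro g num
    have hba : b ≤ a := by omega
    rw [PySem.List.pyRange_one_eq_nil hba]
    simp only [List.foldl_nil]
    refine Prod.ext ?_ (by simp; omega)
    apply List.ext_getElem
    · simp
    · intro i h1 h2
      simp only [List.getElem_mapIdx]
      rw [if_neg (by omega)]
  | succ n ih =>
    intro g num
    have hab : a < b := by omega
    rw [PySem.List.pyRange_one_cons hab]
    simp only [List.foldl_cons]
    have hcell : pvCell c (g, num) a =
        (PySem.List.pySetD g a (PySem.List.pySetD (PySem.List.pyGetD g a []) c num), num + 1) := rfl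
    rw [hcell, ih (a + 1) (by omega) (by omega)]
    refine Prod.ext ?_ (by simp; omega)
    simp only
    apply List.ext_getElem
    · simp [PySem.List.pySetD_of_nonneg _ _ ha]
    · intro i h1 h2
      simp only [List.getElem_mapIdx]
      simp only [PySem.List.pySetD_of_nonneg _ _ ha, List.getElem_set]
      simp only [List.length_mapIdx, List.length_set,
        PySem.List.pySetD_of_nonneg _ _ ha] at h1 h2
      by_cases hia : a.toNat = i
      · subst hia
        rw [if_neg (by omega), if_pos rfl, if_pos (by constructor <;> omega)]
        rw [PySem.List.pyGetD_eq_getElem g [] ha (by omega)]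
        congr 1
        omega
      · rw [if_neg hia]
        by_cases hle : a + 1 ≤ (i : Int) ∧ (i : Int) < b
        · rw [if_pos hle, if_pos (by omega)]
          congr 1
          omega
        · rw [if_neg hle, if_neg (by omega)]

-- One outer iteration turns the partially filled grid for k into the one for k-1.
lemma pv_col_step (row col k : Int) (hr : 0 < row) (hk1 : 1 ≤ k) :
    pvColStep row col (pvGrid row col k, (col - k) * row + 1) (k - 1) =
      (pvGrid row col (k - 1), (col - (k - 1)) * row + 1) := by
  have hmodcol := PySem.Int.mod_two_eq col
  have hmodc := PySem.Int.mod_two_eq (k - 1)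
  have hcolnn := PySem.Int.mod_nonneg col (b := 2) (by omega)
  have hcnn := PySem.Int.mod_nonneg (k - 1) (b := 2) (by omega)
  unfold pvColStep
  by_cases hP : PySem.Int.mod (k - 1) 2 = PySem.Int.mod col 2
  · rw [if_neg (by omega)]
    rw [pv_inner_up (k - 1) row 0 (by omega)]
    refine Prod.ext ?_ (by simp only [sub_zero]; rw [max_eq_left hr.le]; ring)
    simp only
    apply List.ext_getElem
    · simp [pvGrid]
    · intro i h1 h2
      simp only [pvGrid, List.getElem_mapIdx, List.getElem_map,
        PySem.List.getElem_pyRange_one]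
      simp only [List.length_mapIdx, List.length_map, PySem.List.length_pyRange_one,
        pvGrid] at h1 h2
      rw [if_pos (by constructor <;> omega)]
      rw [PySem.List.pySetD_of_nonneg _ _ (show (0:Int) ≤ k - 1 by omega)]
      apply List.ext_getElem
      · simp
      · intro j hj1 hj2
        simp only [List.length_set, List.length_map, PySem.List.length_pyRange_one] at hj1 hj2
        rw [List.getElem_set]
        simp only [List.getElem_map, PySem.List.getElem_pyRange_one]
        by_cases hjc : (k - 1).toNat = j
        · rw [if_pos hjc]
          have hje : (0 : Int) + (j : Int) = k - 1 := by omega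
          rw [hje]
          rw [if_neg (by omega), pvVal, if_neg (not_not_intro hP)]
          ring
        · rw [if_neg hjc]
          by_cases hlt : (0 : Int) + (j : Int) < k - 1
          · rw [if_pos (by omega), if_pos (by omega)]
          · rw [if_neg (by omega), if_neg (by omega)]
  · rw [if_pos (by omega)]
    rw [pv_inner_down (k - 1) (row - 1) (by omega)]
    refine Prod.ext ?_ (by simp; ring)
    simp only
    apply List.ext_getElem
    · simp [pvGrid]
    · intro i h1 h2
      simp only [pvGrid, List.getElem_mapIdx, List.getElem_map,
        PySem.List.getElem_pyRange_one]
      simp only [List.length_mapIdx, List.length_map, PySem.List.length_pyRange_one,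
        pvGrid] at h1 h2
      rw [if_pos (by omega)]
      rw [PySem.List.pySetD_of_nonneg _ _ (show (0:Int) ≤ k - 1 by omega)]
      apply List.ext_getElem
      · simp
      · intro j hj1 hj2
        simp only [List.length_set, List.length_map, PySem.List.length_pyRange_one] at hj1 hj2
        rw [List.getElem_set]
        simp only [List.getElem_map, PySem.List.getElem_pyRange_one]
        by_cases hjc : (k - 1).toNat = j
        · rw [if_pos hjc]
          have hje : (0 : Int) + (j : Int) = k - 1 := by omega
          rw [hje]
          rw [if_neg (by omega), pvVal, if_pos hP]
          ring
        · rw [if_neg hjc]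
          by_cases hlt : (0 : Int) + (j : Int) < k - 1
          · rw [if_pos (by omega), if_pos (by omega)]
          · rw [if_neg (by omega), if_neg (by omega)]

-- The whole outer loop, from the grid filled down to column k.
lemma pv_outer (row col : Int) (hr : 0 < row) :
    ∀ (k : Int), 0 ≤ k → k ≤ col →
      (PySem.List.pyRange (k - 1) (-1) (-1)).foldl (pvColStep row col)
          (pvGrid row col k, (col - k) * row + 1) =
        (pvGrid row col 0, col * row + 1) := by
  intro k hk0
  induction hn : k.toNat generalizing k with
  | zero =>
    intro hkc
    have hk : k = 0 := by omega
    subst hk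
    rw [PySem.List.pyRange_neg_one_eq_nil (by omega)]
    simp
  | succ n ih =>
    intro hkc
    rw [PySem.List.pyRange_neg_one_cons (by omega)]
    simp only [List.foldl_cons]
    rw [pv_col_step row col k hr (by omega)]
    exact ih (k - 1) (by omega) (by omega) (by omega)

-- When row ≤ 0 every inner range is empty, so each column step is the identity.
lemma pv_foldl_colStep_id (row : Int) (col : Int) (hr : row ≤ 0) :
    ∀ (l : List Int) (st : List (List Int) × Int), l.foldl (pvColStep row col) st = st := by
  intro l
  induction l with
  | nil => intro st; rfl
  | cons x xs ih =>
    intro st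
    simp only [List.foldl_cons]
    have hstep : pvColStep row col st x = st := by
      unfold pvColStep
      rw [PySem.List.pyRange_neg_one_eq_nil (by omega), PySem.List.pyRange_one_eq_nil hr]
      split <;> rfl
    rw [hstep, ih]

-- ===== VERDICT (by name: the statement is the Claim_ definition above) =====
theorem solution_spec : Claim_equal_solution := by
  intro row col _
  unfold Spec_solution
  show ((PySem.List.pyRange (col - 1) (-1) (-1)).foldl (pvColStep row col)
      ((PySem.List.pyRange 0 row 1).map
        (fun _ => (PySem.List.pyRange 0 col 1).map (fun _ => (0 : Int))), 1)).1
    = solution_alt row col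
  unfold solution_alt
  by_cases hr : row ≤ 0
  · rw [pv_foldl_colStep_id row col hr]
    simp [PySem.List.pyRange_one_eq_nil hr]
  · have hr' : 0 < row := by omega
    by_cases hc : col ≤ 0
    · rw [PySem.List.pyRange_neg_one_eq_nil (by omega)]
      simp only [List.foldl_nil]
      apply List.ext_getElem
      · simp
      · intro i h1 h2
        simp [PySem.List.pyRange_one_eq_nil hc]
    · have hc' : 0 < col := by omega
      have hinit : (PySem.List.pyRange 0 row 1).map
          (fun _ => (PySem.List.pyRange 0 col 1).map (fun _ => (0 : Int))) =
          pvGrid row col col := by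
        unfold pvGrid
        apply List.map_congr_left
        intro r _
        apply List.map_congr_left
        intro c hcmem
        rw [PySem.List.mem_pyRange_one] at hcmem
        rw [if_pos hcmem.2]
      have hmain := pv_outer row col hr' col (by omega) le_rfl
      have h1 : (col - col) * row + 1 = (1 : Int) := by ring
      rw [h1] at hmain
      rw [hinit, hmain]
      unfold pvGrid
      apply List.map_congr_left
      intro r _
      apply List.map_congr_left
      intro c hcmem
      rw [PySem.List.mem_pyRange_one] at hcmem
      rw [if_neg (by omega), pvVal]
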